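-- pv_equiv track=rewrite | github.com/adityaanilraut/CoderAI | coderAI/tools/filesystem.py | _find_hunk_position
-- ===== SOURCE A (Python) =====
-- from typing import Any, Optional
--
-- def _find_hunk_position(
--     file_lines: list[str],
--     old_lines: list[str],
--     expected_start: int,
--     search_window: int,
-- ) -> Optional[int]:
--     """Find where a hunk's old_lines match in the file.
--
--     Tries the expected position first, then searches within ±search_window.
--     Comparison strips trailing whitespace so minor trailing-space
--     differences between the diff and the file don't cause failures.
--
--     Returns the 0-indexed start position, or None if no match.
--     """
--     old_normalized = [line.rstrip() for line in old_lines]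
--     n_old = len(old_normalized)
--
--     def _matches_at(pos: int) -> bool:
--         if pos < 0 or pos + n_old > len(file_lines):
--             return False
--         for file_line, old_line in zip(file_lines[pos : pos + n_old], old_normalized):
--             if file_line.rstrip() != old_line:
--                 return False
--         return True
--
--     if _matches_at(expected_start):
--         return expected_start
--
--     for offset in range(1, search_window + 1):
--         if _matches_at(expected_start - offset):
--             return expected_start - offset
--         if _matches_at(expected_start + offset):
--             return expected_start + offset
--
--     return None
-- ===== SOURCE B (Python) =====
-- from typing import Optional
--
-- def _find_hunk_position(
--     file_lines: list[str],
--     old_lines: list[str],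
--     expected_start: int,
--     search_window: int,
-- ) -> Optional[int]:
--     """Single left-to-right scan over the (clamped) window on pre-normalized
--     lines, keeping the candidate with the smallest (|pos-expected|, pos) key."""
--     file_norm = [line.rstrip() for line in file_lines]
--     old_norm = [line.rstrip() for line in old_lines]
--     n = len(old_norm)
--     w = max(search_window, 0)
--     lo = max(expected_start - w, 0)
--     hi = min(expected_start + w, len(file_lines) - n)
--     best = None
--     for pos in range(lo, hi + 1):
--         if file_norm[pos:pos + n] == old_norm:
--             k = (abs(pos - expected_start), pos)
--             best = k if best is None else min(best, k)
--     return best[1] if best is not None else None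
-- ===== Notes on version B (the rewrite author's own statement) =====
-- stated objective: alternative
-- what changed: B normalizes (rstrips) all lines once up front and does a single ascending scan over the clamped search window, keeping the best (|pos-expected|, pos) key, instead of A's centre-out zigzag probing that re-rstrips the file slice on every probe.
import Mathlib
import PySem

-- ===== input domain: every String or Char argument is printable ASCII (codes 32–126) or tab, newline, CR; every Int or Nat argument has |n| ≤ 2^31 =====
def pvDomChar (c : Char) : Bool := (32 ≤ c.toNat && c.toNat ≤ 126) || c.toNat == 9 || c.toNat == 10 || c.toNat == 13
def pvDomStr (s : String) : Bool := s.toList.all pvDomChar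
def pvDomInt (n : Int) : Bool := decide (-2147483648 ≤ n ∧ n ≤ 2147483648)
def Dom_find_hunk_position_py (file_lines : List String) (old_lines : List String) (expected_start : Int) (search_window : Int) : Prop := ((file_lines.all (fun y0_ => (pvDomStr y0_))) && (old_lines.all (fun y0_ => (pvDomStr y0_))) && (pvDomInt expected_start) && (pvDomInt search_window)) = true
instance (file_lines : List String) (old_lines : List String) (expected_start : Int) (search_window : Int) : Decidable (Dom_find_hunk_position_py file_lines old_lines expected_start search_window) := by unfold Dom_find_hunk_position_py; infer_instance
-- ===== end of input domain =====

-- B replaces A's centre-out zigzag probing (which re-rstrips the file slice at every probe)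
-- by a one-time normalization of all lines and a single ascending scan of the clamped window
-- keeping the best (|pos-expected|, pos) key; alternative structure, same result.


-- ===== PORT A =====
-- helper: Python's nested `_matches_at` (closure over file_lines, old_normalized)
def pvMatchesAt (file_lines : List String) (old_normalized : List String) (pos : Int) : Bool :=
  if pos < 0 || pos + (old_normalized.length : Int) > (file_lines.length : Int) then false
  else ((PySem.List.slice file_lines (some pos) (some (pos + (old_normalized.length : Int)))).zip old_normalized).all
        (fun fo => PySem.Str.rstrip fo.1 == fo.2)

def find_hunk_position_py (file_lines : List String) (old_lines : List String) (expected_start : Int) (search_window : Int) : Option Int :=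
  let old_normalized := old_lines.map (fun line => PySem.Str.rstrip line)
  if pvMatchesAt file_lines old_normalized expected_start then some expected_start
  else (PySem.List.pyRange 1 (search_window + 1) 1).findSome? (fun offset =>
    if pvMatchesAt file_lines old_normalized (expected_start - offset) then some (expected_start - offset)
    else if pvMatchesAt file_lines old_normalized (expected_start + offset) then some (expected_start + offset)
    else none)

-- ===== PORT B =====
-- Python tuple comparison `k < b` on the (dist, pos) keys
def pvKeyLt (a b : Int × Int) : Bool := a.1 < b.1 || (a.1 == b.1 && a.2 < b.2)

-- the body of B's for-loop: fold one position into the current best key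
def pvStep (file_norm : List String) (old_norm : List String) (e : Int) (best : Option (Int × Int)) (pos : Int) : Option (Int × Int) :=
  if PySem.List.slice file_norm (some pos) (some (pos + (old_norm.length : Int))) == old_norm then
    some (match best with
      | none => (|pos - e|, pos)
      | some b => if pvKeyLt (|pos - e|, pos) b then (|pos - e|, pos) else b)
  else best

def find_hunk_position_py_alt (file_lines : List String) (old_lines : List String) (expected_start : Int) (search_window : Int) : Option Int :=
  let file_norm := file_lines.map (fun line => PySem.Str.rstrip line)
  let old_norm := old_lines.map (fun line => PySem.Str.rstrip line)
  let w := max search_window 0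
  let lo := max (expected_start - w) 0
  let hi := min (expected_start + w) ((file_lines.length : Int) - (old_norm.length : Int))
  match (PySem.List.pyRange lo (hi + 1) 1).foldl (pvStep file_norm old_norm expected_start) none with
  | some b => some b.2
  | none => none

-- ===== PRECONDITION & SPEC =====
def Spec_find_hunk_position_py (file_lines : List String) (old_lines : List String) (expected_start : Int) (search_window : Int) (out : Option Int) : Prop := out = find_hunk_position_py_alt file_lines old_lines expected_start search_window
instance (file_lines : List String) (old_lines : List String) (expected_start : Int) (search_window : Int) (out : Option Int) : Decidable (Spec_find_hunk_position_py file_lines old_lines expected_start search_window out) := by unfold Spec_find_hunk_position_py; infer_instance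

-- ===== CLAIM (what is proved, stated in full; the proofs are below) =====
def Claim_equal_find_hunk_position_py : Prop := ∀ (file_lines : List String) (old_lines : List String) (expected_start : Int) (search_window : Int), Dom_find_hunk_position_py file_lines old_lines expected_start search_window → Spec_find_hunk_position_py file_lines old_lines expected_start search_window (find_hunk_position_py file_lines old_lines expected_start search_window)


-- ===== LEMMAS AND PROOFS =====

-- the slice-equality test B's loop performs at a position
def pvMb (fn on : List String) (p : Int) : Bool :=
  PySem.List.slice fn (some p) (some (p + (on.length : Int))) == on

-- B's key for a candidate position
def pvKey (e p : Int) : Int × Int := (|p - e|, p)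

lemma pvStep_eq (fn on : List String) (e : Int) (b : Option (Int × Int)) (p : Int) :
    pvStep fn on e b p =
      if pvMb fn on p then
        some (match b with
          | none => pvKey e p
          | some bb => if pvKeyLt (pvKey e p) bb then pvKey e p else bb)
      else b := rfl

lemma pvKeyLt_eq_false_iff (a b : Int × Int) :
    pvKeyLt a b = false ↔ (b.1 < a.1 ∨ (b.1 = a.1 ∧ b.2 ≤ a.2)) := by
  simp [pvKeyLt]
  omega

lemma pvFold_none_iff (fn on : List String) (e : Int) :
    ∀ (l : List Int) (acc : Option (Int × Int)),
      l.foldl (pvStep fn on e) acc = none ↔ acc = none ∧ ∀ p ∈ l, pvMb fn on p = false := by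
  intro l
  induction l with
  | nil => intro acc; simp
  | cons p l ih =>
    intro acc
    rw [List.foldl_cons, ih]
    by_cases h : pvMb fn on p = true
    · constructor
      · rintro ⟨h1, -⟩
        rw [pvStep_eq, if_pos h] at h1
        exact absurd h1 (by simp)
      · rintro ⟨-, h2⟩
        exact absurd (h2 p (by simp)) (by simp [h])
    · rw [pvStep_eq, if_neg h]
      simp only [Bool.not_eq_true] at h
      constructor
      · rintro ⟨h1, h2⟩
        refine ⟨h1, fun q hq => ?_⟩
        rcases List.mem_cons.mp hq with rfl | hq
        · exact h
        · exact h2 q hq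
      · rintro ⟨h1, h2⟩
        exact ⟨h1, fun q hq => h2 q (List.mem_cons_of_mem _ hq)⟩

lemma pvFold_some_char (fn on : List String) (e : Int) :
    ∀ (l : List Int) (acc : Option (Int × Int)) (k : Int × Int),
      l.foldl (pvStep fn on e) acc = some k →
      (acc = some k ∨ ∃ p ∈ l, pvMb fn on p = true ∧ k = pvKey e p) ∧
      (∀ b, acc = some b → pvKeyLt b k = false) ∧
      (∀ p ∈ l, pvMb fn on p = true → pvKeyLt (pvKey e p) k = false) := by
  intro l
  induction l with
  | nil =>
    intro acc k h
    simp only [List.foldl_nil] at h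
    refine ⟨Or.inl h, fun b hb => ?_, by simp⟩
    rw [hb] at h
    cases h
    rw [pvKeyLt_eq_false_iff]
    omega
  | cons p l ih =>
    intro acc k h
    rw [List.foldl_cons] at h
    obtain ⟨H1, H2, H3⟩ := ih (pvStep fn on e acc p) k h
    by_cases hm : pvMb fn on p = true
    · -- pvStep acc p produced some intermediate b' with b' "≤" pvKey e p
      have hstep : ∃ b', pvStep fn on e acc p = some b' ∧
          pvKeyLt (pvKey e p) b' = false ∧
          (b' = pvKey e p ∨ acc = some b') := by
        cases acc with
        | none =>
          exact ⟨pvKey e p, by simp [pvStep_eq, hm], by rw [pvKeyLt_eq_false_iff]; omega, Or.inl rfl⟩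
        | some b =>
          by_cases hlt : pvKeyLt (pvKey e p) b = true
          · exact ⟨pvKey e p, by simp [pvStep_eq, hm, hlt], by rw [pvKeyLt_eq_false_iff]; omega,
              Or.inl rfl⟩
          · refine ⟨b, by simp [pvStep_eq, hm, hlt], ?_, Or.inr rfl⟩
            simpa using hlt
      obtain ⟨b', hb', hble, hbcase⟩ := hstep
      have hk_le_b' : pvKeyLt b' k = false := H2 b' hb'
      refine ⟨?_, ?_, ?_⟩
      · -- membership
        rcases H1 with h1 | ⟨q, hq, hq1, hq2⟩
        · rw [hb'] at h1
          cases h1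
          rcases hbcase with hb | hb
          · exact Or.inr ⟨p, by simp, hm, hb.symm ▸ rfl⟩
          · exact Or.inl hb
        · exact Or.inr ⟨q, List.mem_cons_of_mem _ hq, hq1, hq2⟩
      · -- acc bound
        intro b hb
        subst hb
        by_cases hlt : pvKeyLt (pvKey e p) b = true
        · -- b' = pvKey e p < b ; k ≤ b' so k ≤ b
          have hb'' : b' = pvKey e p := by
            have := hb'.symm.trans (by simp [pvStep_eq, hm, hlt] : pvStep fn on e (some b) p = some (pvKey e p))
            exact Option.some_inj.mp this
          subst hb''
          rw [pvKeyLt_eq_false_iff] at hk_le_b' ⊢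
          simp only [pvKeyLt, Bool.or_eq_true, decide_eq_true_eq, Bool.and_eq_true,
            beq_iff_eq] at hlt
          omega
        · have hb'' : b' = b := by
            have := hb'.symm.trans (by simp [pvStep_eq, hm, hlt] : pvStep fn on e (some b) p = some b)
            exact Option.some_inj.mp this
          exact hb'' ▸ hk_le_b'
      · -- element bound
        intro q hq hmq
        rcases List.mem_cons.mp hq with rfl | hq
        · -- k ≤ b' ≤ pvKey e q
          rw [pvKeyLt_eq_false_iff] at hk_le_b' hble ⊢
          omega
        · exact H3 q hq hmq
    · rw [pvStep_eq, if_neg hm] at H1 H2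
      refine ⟨?_, H2, ?_⟩
      · rcases H1 with h1 | ⟨q, hq, hq1, hq2⟩
        · exact Or.inl h1
        · exact Or.inr ⟨q, List.mem_cons_of_mem _ hq, hq1, hq2⟩
      · intro q hq hmq
        rcases List.mem_cons.mp hq with rfl | hq
        · exact absurd hmq (by simp [hm])
        · exact H3 q hq hmq

-- the common characterisation: x is the matching position closest to e within window w,
-- ties broken towards the smaller position; none iff no match in the window
def pvGood (Ma : Int → Bool) (e w : Int) (x : Option Int) : Prop :=
  (x = none → ∀ p : Int, |p - e| ≤ w → Ma p = false) ∧
  (∀ p : Int, x = some p → Ma p = true ∧ |p - e| ≤ w ∧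
    ∀ q : Int, Ma q = true → |q - e| ≤ w →
      (|p - e| < |q - e| ∨ (|p - e| = |q - e| ∧ p ≤ q)))

lemma pvGood_unique (Ma : Int → Bool) (e w : Int) (x y : Option Int)
    (hx : pvGood Ma e w x) (hy : pvGood Ma e w y) : x = y := by
  obtain ⟨hxn, hxs⟩ := hx
  obtain ⟨hyn, hys⟩ := hy
  cases x with
  | none =>
    cases y with
    | none => rfl
    | some q =>
      obtain ⟨hq1, hq2, -⟩ := hys q rfl
      exact absurd (hxn rfl q hq2) (by simp [hq1])
  | some p =>
    cases y with
    | none =>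
      obtain ⟨hp1, hp2, -⟩ := hxs p rfl
      exact absurd (hyn rfl p hp2) (by simp [hp1])
    | some q =>
      obtain ⟨hp1, hp2, hpmin⟩ := hxs p rfl
      obtain ⟨hq1, hq2, hqmin⟩ := hys q rfl
      have h1 := hpmin q hq1 hq2
      have h2 := hqmin p hp1 hp2
      have : p = q := by omega
      rw [this]


-- ===== A-side characterisation: the centre-out zigzag search =====

-- A's search with the window size as a Nat (for induction)
def pvZigN (Ma : Int → Bool) (e : Int) (t : Nat) : Option Int :=
  if Ma e then some e
  else (PySem.List.pyRange 1 ((t : Int) + 1) 1).findSome? (fun off =>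
    if Ma (e - off) then some (e - off)
    else if Ma (e + off) then some (e + off) else none)

lemma pvA_eq_zigN (fl ol : List String) (e W : Int) :
    find_hunk_position_py fl ol e W =
      pvZigN (pvMatchesAt fl (ol.map (fun line => PySem.Str.rstrip line))) e (max W 0).toNat := by
  have hr : PySem.List.pyRange 1 (W + 1) 1 =
      PySem.List.pyRange 1 ((((max W 0).toNat : Int)) + 1) 1 := by
    by_cases h : W ≤ 0
    · rw [PySem.List.pyRange_one_eq_nil (by omega), PySem.List.pyRange_one_eq_nil (by omega)]
    · congr 1
      omega
  simp only [find_hunk_position_py, pvZigN]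
  rw [hr]

lemma pvZigN_good (Ma : Int → Bool) (e : Int) :
    ∀ t : Nat, pvGood Ma e (t : Int) (pvZigN Ma e t) := by
  intro t
  induction t with
  | zero =>
    by_cases hme : Ma e = true
    · have hz : pvZigN Ma e 0 = some e := by simp [pvZigN, hme]
      constructor
      · intro h; rw [hz] at h; cases h
      · intro p hp
        rw [hz] at hp
        have hpe : p = e := by cases hp; rfl
        subst hpe
        refine ⟨hme, by simp, fun q hq hqw => ?_⟩
        simp only [Int.abs_eq_natAbs] at *
        omega
    · have hz : pvZigN Ma e 0 = none := by
        simp only [pvZigN, hme, if_false, Bool.false_eq_true]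
        rw [PySem.List.pyRange_one_eq_nil (by omega)]
        rfl
      constructor
      · intro _ p hp
        have hpe : p = e := by simp only [Int.abs_eq_natAbs] at hp; omega
        subst hpe
        simpa using hme
      · intro p hp; rw [hz] at hp; cases hp
  | succ t ih =>
    obtain ⟨ihn, ihs⟩ := ih
    by_cases hme : Ma e = true
    · have hz : pvZigN Ma e (t + 1) = some e := by simp [pvZigN, hme]
      constructor
      · intro h; rw [hz] at h; cases h
      · intro p hp
        rw [hz] at hp
        have hpe : p = e := by cases hp; rfl
        subst hpe
        refine ⟨hme, by simp; omega, fun q hq hqw => ?_⟩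
        simp only [Int.abs_eq_natAbs] at *
        omega
    · have hsplit : PySem.List.pyRange 1 (((t + 1 : Nat) : Int) + 1) 1 =
          PySem.List.pyRange 1 ((t : Int) + 1) 1 ++ [(t : Int) + 1] := by
        push_cast
        exact PySem.List.pyRange_one_succ_right (by omega)
      have hz : pvZigN Ma e (t + 1) = (pvZigN Ma e t).or
          (if Ma (e - ((t : Int) + 1)) then some (e - ((t : Int) + 1))
           else if Ma (e + ((t : Int) + 1)) then some (e + ((t : Int) + 1)) else none) := by
        simp only [pvZigN, hme, if_false, Bool.false_eq_true, hsplit, List.findSome?_append]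
        simp
      cases hzt : pvZigN Ma e t with
      | some p =>
        rw [hzt] at hz
        simp only [Option.some_or] at hz
        obtain ⟨hp1, hp2, hpmin⟩ := ihs p hzt
        constructor
        · intro h; rw [hz] at h; cases h
        · intro p' hp'
          rw [hz] at hp'
          have : p = p' := by cases hp'; rfl
          subst this
          refine ⟨hp1, by simp only [Int.abs_eq_natAbs] at *; omega, fun q hq hqw => ?_⟩
          by_cases hqt : |q - e| ≤ (t : Int)
          · exact hpmin q hq hqt
          · simp only [Int.abs_eq_natAbs] at *
            omega
      | none =>
        rw [hzt] at hz
        simp only [Option.none_or] at hz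
        have hnone := ihn hzt
        by_cases h1 : Ma (e - ((t : Int) + 1)) = true
        · rw [if_pos h1] at hz
          constructor
          · intro h; rw [hz] at h; cases h
          · intro p hp
            rw [hz] at hp
            have hpe : p = e - ((t : Int) + 1) := by cases hp; rfl
            subst hpe
            refine ⟨h1, by simp only [Int.abs_eq_natAbs]; omega, fun q hq hqw => ?_⟩
            have hqt : ¬ |q - e| ≤ (t : Int) := fun hle => by
              rw [hnone q hle] at hq; cases hq
            simp only [Int.abs_eq_natAbs] at *
            omega
        · rw [if_neg h1] at hz
          by_cases h2 : Ma (e + ((t : Int) + 1)) = true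
          · rw [if_pos h2] at hz
            constructor
            · intro h; rw [hz] at h; cases h
            · intro p hp
              rw [hz] at hp
              have hpe : p = e + ((t : Int) + 1) := by cases hp; rfl
              subst hpe
              refine ⟨h2, by simp only [Int.abs_eq_natAbs]; omega, fun q hq hqw => ?_⟩
              have hqt : ¬ |q - e| ≤ (t : Int) := fun hle => by
                rw [hnone q hle] at hq; cases hq
              have hql : q ≠ e - ((t : Int) + 1) := by
                intro hq'; rw [hq'] at hq; exact h1 hq
              simp only [Int.abs_eq_natAbs] at *
              omega
          · rw [if_neg h2] at hz
            constructor
            · intro _ p hp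
              by_cases hpt : |p - e| ≤ (t : Int)
              · exact hnone p hpt
              · have : p = e - ((t : Int) + 1) ∨ p = e + ((t : Int) + 1) := by
                  simp only [Int.abs_eq_natAbs] at *
                  omega
                rcases this with rfl | rfl
                · simpa using h1
                · simpa using h2
            · intro p hp; rw [hz] at hp; cases hp

-- ===== bridge between A's match test and B's slice-equality test =====

lemma pvZipAll_eq {α β : Type} [BEq β] [LawfulBEq β] (f : α → β) :
    ∀ (xs : List α) (ys : List β), xs.length = ys.length →
      ((xs.zip ys).all (fun fo => f fo.1 == fo.2)) = (xs.map f == ys) := by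
  intro xs
  induction xs with
  | nil =>
    intro ys h
    cases ys with
    | nil => simp
    | cons y ys => simp at h
  | cons x xs ih =>
    intro ys h
    cases ys with
    | nil => simp at h
    | cons y ys =>
      simp only [List.zip_cons_cons, List.all_cons, List.map_cons, List.cons_beq_cons]
      rw [ih ys (by simpa using h)]

lemma pvMa_oob (fl on' : List String) (p : Int)
    (h : p < 0 ∨ p + (on'.length : Int) > (fl.length : Int)) :
    pvMatchesAt fl on' p = false := by
  unfold pvMatchesAt
  rw [if_pos]
  simp only [Bool.or_eq_true, decide_eq_true_eq]
  omega

lemma pvMa_bounds (fl on' : List String) (p : Int) (h : pvMatchesAt fl on' p = true) :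
    0 ≤ p ∧ p + (on'.length : Int) ≤ (fl.length : Int) := by
  by_contra hc
  rw [pvMa_oob fl on' p (by omega)] at h
  cases h

lemma pvMb_eq_Ma (fl on' : List String) (p : Int) (h0 : 0 ≤ p)
    (h1 : p + (on'.length : Int) ≤ (fl.length : Int)) :
    pvMb (fl.map (fun line => PySem.Str.rstrip line)) on' p = pvMatchesAt fl on' p := by
  unfold pvMb pvMatchesAt
  rw [if_neg (by simp only [Bool.or_eq_true, decide_eq_true_eq]; omega)]
  have hs : PySem.List.slice fl (some p) (some (p + (on'.length : Int))) =
      (fl.drop p.toNat).take on'.length := by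
    rw [PySem.List.slice_toNat fl (by omega) (by omega)]
    have hc : (p + (on'.length : Int)).toNat - p.toNat = on'.length := by omega
    rw [hc]
  have hs' : PySem.List.slice (fl.map (fun line => PySem.Str.rstrip line)) (some p)
        (some (p + (on'.length : Int))) =
      ((fl.drop p.toNat).take on'.length).map (fun line => PySem.Str.rstrip line) := by
    rw [PySem.List.slice_toNat _ (by omega) (by omega)]
    rw [← List.map_drop, ← List.map_take]
    have hc : (p + (on'.length : Int)).toNat - p.toNat = on'.length := by omega
    rw [hc]
  rw [hs, hs']
  exact (pvZipAll_eq (fun line => PySem.Str.rstrip line) _ on'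
    (by simp [List.length_take, List.length_drop]; omega)).symm

-- ===== the two ports both satisfy the characterisation =====

lemma pvA_good (fl ol : List String) (e W : Int) :
    pvGood (pvMatchesAt fl (ol.map (fun line => PySem.Str.rstrip line))) e (max W 0)
      (find_hunk_position_py fl ol e W) := by
  rw [pvA_eq_zigN]
  have h := pvZigN_good (pvMatchesAt fl (ol.map (fun line => PySem.Str.rstrip line))) e
    (max W 0).toNat
  rwa [Int.toNat_of_nonneg (le_max_right W 0)] at h

lemma pvB_good (fl ol : List String) (e W : Int) :
    pvGood (pvMatchesAt fl (ol.map (fun line => PySem.Str.rstrip line))) e (max W 0)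
      (find_hunk_position_py_alt fl ol e W) := by
  have hB : find_hunk_position_py_alt fl ol e W =
      (match (PySem.List.pyRange (max (e - max W 0) 0)
          (min (e + max W 0) ((fl.length : Int) - ((ol.map (fun line => PySem.Str.rstrip line)).length : Int)) + 1) 1).foldl
          (pvStep (fl.map (fun line => PySem.Str.rstrip line))
            (ol.map (fun line => PySem.Str.rstrip line)) e) none with
       | some b => some b.2
       | none => none) := rfl
  have hmem : ∀ p : Int,
      (pvMatchesAt fl (ol.map (fun line => PySem.Str.rstrip line)) p = true ∧ |p - e| ≤ max W 0) ↔
      (p ∈ PySem.List.pyRange (max (e - max W 0) 0)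
          (min (e + max W 0) ((fl.length : Int) - ((ol.map (fun line => PySem.Str.rstrip line)).length : Int)) + 1) 1 ∧
        pvMb (fl.map (fun line => PySem.Str.rstrip line)) (ol.map (fun line => PySem.Str.rstrip line)) p = true) := by
    intro p
    constructor
    · rintro ⟨hma, hpw⟩
      obtain ⟨hb0, hb1⟩ := pvMa_bounds _ _ _ hma
      refine ⟨PySem.List.mem_pyRange_one.mpr ?_, ?_⟩
      · simp only [Int.abs_eq_natAbs] at hpw
        omega
      · rw [pvMb_eq_Ma _ _ _ hb0 hb1]
        exact hma
    · rintro ⟨hmem, hmb⟩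
      have hrange := PySem.List.mem_pyRange_one.mp hmem
      have hb0 : 0 ≤ p := by omega
      have hb1 : p + ((ol.map (fun line => PySem.Str.rstrip line)).length : Int) ≤ (fl.length : Int) := by
        omega
      rw [pvMb_eq_Ma _ _ _ hb0 hb1] at hmb
      refine ⟨hmb, ?_⟩
      simp only [Int.abs_eq_natAbs]
      omega
  cases hres : (PySem.List.pyRange (max (e - max W 0) 0)
      (min (e + max W 0) ((fl.length : Int) - ((ol.map (fun line => PySem.Str.rstrip line)).length : Int)) + 1) 1).foldl
      (pvStep (fl.map (fun line => PySem.Str.rstrip line))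
        (ol.map (fun line => PySem.Str.rstrip line)) e) none with
  | none =>
    rw [hres] at hB
    constructor
    · intro _ p hpw
      by_cases hma : pvMatchesAt fl (ol.map (fun line => PySem.Str.rstrip line)) p = true
      · obtain ⟨hm1, hm2⟩ := (hmem p).mp ⟨hma, hpw⟩
        obtain ⟨-, hall⟩ := (pvFold_none_iff _ _ _ _ _).mp hres
        rw [hall p hm1] at hm2
        cases hm2
      · simpa using hma
    · intro p hp
      rw [hB] at hp
      cases hp
  | some k =>
    rw [hres] at hB
    constructor
    · intro h
      rw [hB] at h
      cases h
    · intro p hp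
      rw [hB] at hp
      have hpk : p = k.2 := by cases hp; rfl
      obtain ⟨H1, -, H3⟩ := pvFold_some_char _ _ _ _ _ _ hres
      rcases H1 with h | ⟨q, hq, hqm, hqk⟩
      · cases h
      · have hqmem := (hmem q).mpr ⟨hq, hqm⟩
        have hpq : p = q := by rw [hpk, hqk]; rfl
        subst hpq
        refine ⟨hqmem.1, hqmem.2, fun r hr hrw => ?_⟩
        obtain ⟨hr1, hr2⟩ := (hmem r).mp ⟨hr, hrw⟩
        have hkey := H3 r hr1 hr2
        rw [hqk, pvKeyLt_eq_false_iff] at hkey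
        simp only [pvKey] at hkey ⊢
        simp only [Int.abs_eq_natAbs] at *
        omega

-- ===== VERDICT (by name: the statement is the Claim_ definition above) =====
theorem find_hunk_position_py_spec : Claim_equal_find_hunk_position_py := by
  intro file_lines old_lines expected_start search_window _
  unfold Spec_find_hunk_position_py
  exact pvGood_unique _ expected_start (max search_window 0) _ _
    (pvA_good file_lines old_lines expected_start search_window)
    (pvB_good file_lines old_lines expected_start search_window)
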